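-- pv_equiv track=rewrite | github.com/hankuipeng/HackerRank | General/Solved/DynamicProgramming/abbreviation.py | abbreviation3
-- ===== SOURCE A (Python) =====
-- def abbreviation3(a, b):
--
--     ans = 'NO'
--     counter = 0
--     check = [0]*len(a)
--
--     for v in b:
--         for i in range(counter, len(a)):
--             if a[i] == v or a[i] == v.lower():
--                 counter = i+1
--                 check[i] = 1
--                 break
--     #import pdb
--     #pdb.set_trace()
--     if sum(check) == len(b):
--         logi = [a[ind].isupper() for ind, val in enumerate(check) if val < 1]
--         if sum(logi) == 0:
--             ans = 'YES'
--     return ans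
-- ===== SOURCE B (Python) =====
-- def abbreviation3(a, b):
--     # one flat two-pointer walk: j over b; a char either consumes b[j] or, if skipped
--     # and uppercase, poisons the answer
--     j = 0
--     bad = False
--     for c in a:
--         if j < len(b) and (c == b[j] or c == b[j].lower()):
--             j += 1
--         elif c.isupper():
--             bad = True
--     return 'YES' if j == len(b) and not bad else 'NO'
-- ===== Notes on version B (the rewrite author's own statement) =====
-- stated objective: faster
-- what changed: A's nested loop (for each b-char, an inner scan over a with break) plus a 0/1 check array and two post-passes (sum, uppercase list comprehension) is replaced by one flat two-pointer walk over a that carries only the b-pointer and a bad-uppercase flag, deciding the answer with a single final comparison.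
import Mathlib
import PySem

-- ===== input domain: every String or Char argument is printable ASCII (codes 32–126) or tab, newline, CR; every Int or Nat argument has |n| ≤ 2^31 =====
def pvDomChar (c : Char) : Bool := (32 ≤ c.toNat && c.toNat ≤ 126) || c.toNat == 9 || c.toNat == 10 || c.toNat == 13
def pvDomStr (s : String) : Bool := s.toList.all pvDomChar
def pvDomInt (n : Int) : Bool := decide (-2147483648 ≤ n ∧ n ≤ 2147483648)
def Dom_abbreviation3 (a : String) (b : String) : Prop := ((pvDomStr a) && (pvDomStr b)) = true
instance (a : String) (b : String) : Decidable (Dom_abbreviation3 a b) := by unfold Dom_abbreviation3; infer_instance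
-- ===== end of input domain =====

-- B replaces A's nested loops and 0/1 check array by one flat two-pointer walk over `a`
-- carrying only the b-pointer and a bad-uppercase flag (objective: faster, O(|a|*|b|) -> O(|a|+|b|), measured).

-- the match test both Pythons write: a-char equals the b-char or its lowercase
def pvOk (c w : Char) : Bool := c == w || c == PySem.Chars.lowerChar w

-- ===== PORT A =====
-- inner `for i in range(counter, len(a)): … break` of A: first index ≥ i whose char matches v
def pvFindFrom (aL : List Char) (v : Char) (i : Nat) : Option Nat :=
  if h : i < aL.length then
    if pvOk (aL.getD i ' ') v then some i else pvFindFrom aL v (i + 1)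
  else none
termination_by aL.length - i

def abbreviation3 (a : String) (b : String) : String :=
  let aL := a.toList
  let st := b.toList.foldl
    (fun (st : Nat × List Nat) v =>
      match pvFindFrom aL v st.1 with
      | some i => (i + 1, st.2.set i 1)
      | none => st)
    (0, List.replicate aL.length 0)
  if st.2.sum == b.toList.length then
    let logi := (PySem.List.enumerate st.2).filterMap
      (fun p => if p.2 < 1 then some (PySem.Chars.isupper (aL.getD p.1.toNat ' ')) else none)
    if logi.countP id == 0 then "YES" else "NO"
  else "NO"

-- ===== PORT B =====
def abbreviation3_alt (a : String) (b : String) : String :=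
  let bL := b.toList
  let st := a.toList.foldl
    (fun (st : Nat × Bool) c =>
      if st.1 < bL.length && pvOk c (bL.getD st.1 ' ') then (st.1 + 1, st.2)
      else if PySem.Chars.isupper c then (st.1, true)
      else st)
    (0, false)
  if st.1 == bL.length && !st.2 then "YES" else "NO"

-- ===== PRECONDITION & SPEC =====
def Spec_abbreviation3 (a : String) (b : String) (out : String) : Prop := out = abbreviation3_alt a b
instance (a : String) (b : String) (out : String) : Decidable (Spec_abbreviation3 a b out) := by unfold Spec_abbreviation3; infer_instance

-- ===== CLAIM (what is proved, stated in full; the proofs are below) =====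
def Claim_equal_abbreviation3 : Prop := ∀ (a : String) (b : String), Dom_abbreviation3 a b → Spec_abbreviation3 a b (abbreviation3 a b)

-- ===== LEMMAS AND PROOFS =====

-- the common two-pointer semantics both sides are reduced to: from a-index i and b-suffix bs,
-- (number of b-chars matched, whether some skipped a-char is uppercase)
def pvW (aL : List Char) (i : Nat) (bs : List Char) : Nat × Bool :=
  if h : i < aL.length then
    match bs with
    | v :: bs' =>
      if pvOk (aL.getD i ' ') v then
        let r := pvW aL (i + 1) bs'
        (r.1 + 1, r.2)
      else
        let r := pvW aL (i + 1) bs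
        (r.1, PySem.Chars.isupper (aL.getD i ' ') || r.2)
    | [] =>
      let r := pvW aL (i + 1) []
      (r.1, PySem.Chars.isupper (aL.getD i ' ') || r.2)
  else (0, false)
termination_by aL.length - i

lemma pvW_le (aL : List Char) (i : Nat) (bs : List Char) : (pvW aL i bs).1 ≤ bs.length := by
  induction i, bs using pvW.induct aL with
  | case1 i h v bs' hok ih => rw [pvW]; simp only [h, dif_pos, hok, if_pos]; simpa using ih
  | case2 i h v bs' hok ih => rw [pvW]; simp only [h, dif_pos, hok, Bool.false_eq_true, if_false]; simpa using ih
  | case3 i h ih => rw [pvW]; simpa [h] using ih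
  | case4 i bs h => rw [pvW.eq_def]; simp [h]

lemma pvW_nil (aL : List Char) (i : Nat) :
    pvW aL i [] = (0, (List.range' i (aL.length - i)).any (fun k => PySem.Chars.isupper (aL.getD k ' '))) := by
  by_cases h : i < aL.length
  · rw [pvW]
    simp only [h, dif_pos]
    have e : aL.length - i = (aL.length - (i+1)) + 1 := by omega
    rw [e, List.range'_succ]
    simp [pvW_nil aL (i+1)]
  · have e : aL.length - i = 0 := by omega
    rw [pvW]
    simp [h, e]
termination_by aL.length - i

lemma pvW_stuck (aL : List Char) (i : Nat) (v : Char) (bs : List Char)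
    (hno : ∀ k, i ≤ k → k < aL.length → pvOk (aL.getD k ' ') v = false) :
    (pvW aL i (v :: bs)).1 = 0 := by
  by_cases h : i < aL.length
  · have hni : pvOk (aL.getD i ' ') v = false := hno i (le_refl i) h
    rw [pvW]
    rw [dif_pos h, if_neg (by rw [hni]; exact Bool.false_ne_true)]
    exact pvW_stuck aL (i+1) v bs (fun k hk hk2 => hno k (by omega) hk2)
  · rw [pvW.eq_def]; simp [h]
termination_by aL.length - i

lemma pvW_skip (aL : List Char) (i j : Nat) (v : Char) (bs : List Char)
    (hij : i ≤ j) (hj : j < aL.length) (hok : pvOk (aL.getD j ' ') v = true)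
    (hno : ∀ k, i ≤ k → k < j → pvOk (aL.getD k ' ') v = false) :
    pvW aL i (v :: bs) =
      ((pvW aL (j + 1) bs).1 + 1,
       (List.range' i (j - i)).any (fun k => PySem.Chars.isupper (aL.getD k ' ')) || (pvW aL (j + 1) bs).2) := by
  rcases Nat.eq_or_lt_of_le hij with rfl | hlt
  · rw [pvW]
    rw [dif_pos hj, if_pos hok]
    simp
  · have hi : i < aL.length := by omega
    have hni : pvOk (aL.getD i ' ') v = false := hno i (le_refl i) hlt
    rw [pvW]
    rw [dif_pos hi, if_neg (by rw [hni]; exact Bool.false_ne_true)]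
    have e : j - i = (j - (i+1)) + 1 := by omega
    rw [pvW_skip aL (i+1) j v bs (by omega) hj hok (fun k hk hk2 => hno k (by omega) hk2)]
    rw [e, List.range'_succ]
    simp [Bool.or_assoc]
termination_by j - i

lemma pvFindFrom_some (aL : List Char) (v : Char) (i j : Nat) (h : pvFindFrom aL v i = some j) :
    i ≤ j ∧ j < aL.length ∧ pvOk (aL.getD j ' ') v = true ∧
      ∀ k, i ≤ k → k < j → pvOk (aL.getD k ' ') v = false := by
  by_cases hi : i < aL.length
  · rw [pvFindFrom, dif_pos hi] at h
    by_cases hok : pvOk (aL.getD i ' ') v = true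
    · rw [if_pos hok] at h
      obtain rfl : i = j := by simpa using h
      exact ⟨le_refl i, hi, hok, fun k hk hk2 => absurd (by omega : i < i) (by omega)⟩
    · rw [if_neg hok] at h
      obtain ⟨h1, h2, h3, h4⟩ := pvFindFrom_some aL v (i+1) j h
      refine ⟨by omega, h2, h3, fun k hk hk2 => ?_⟩
      rcases Nat.eq_or_lt_of_le hk with rfl | hlt
      · exact Bool.eq_false_iff.mpr hok
      · exact h4 k (by omega) hk2
  · rw [pvFindFrom, dif_neg hi] at h; exact absurd h (by simp)
termination_by aL.length - i

lemma pvFindFrom_none (aL : List Char) (v : Char) (i : Nat) (h : pvFindFrom aL v i = none) :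
    ∀ k, i ≤ k → k < aL.length → pvOk (aL.getD k ' ') v = false := by
  intro k hk hk2
  by_cases hi : i < aL.length
  · rw [pvFindFrom, dif_pos hi] at h
    by_cases hok : pvOk (aL.getD i ' ') v = true
    · rw [if_pos hok] at h; exact absurd h (by simp)
    · rw [if_neg hok] at h
      rcases Nat.eq_or_lt_of_le hk with rfl | hlt
      · exact Bool.eq_false_iff.mpr hok
      · exact pvFindFrom_none aL v (i+1) h k (by omega) hk2
  · omega
termination_by aL.length - i

lemma pvSum_set (check : List Nat) (j : Nat) (hj : j < check.length) (h0 : check.getD j 0 = 0) :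
    (check.set j 1).sum = check.sum + 1 := by
  induction check generalizing j with
  | nil => simp at hj
  | cons x xs ih =>
    cases j with
    | zero => simp at h0; simp [h0]; omega
    | succ m =>
      simp only [List.set_cons_succ, List.sum_cons]
      rw [ih m (by simpa using hj) (by simpa using h0)]
      omega

lemma pvB_fold (bL aL : List Char) (i j : Nat) (bad : Bool) :
    (aL.drop i).foldl
      (fun (st : Nat × Bool) c =>
        if st.1 < bL.length && pvOk c (bL.getD st.1 ' ') then (st.1 + 1, st.2)
        else if PySem.Chars.isupper c then (st.1, true)
        else st)
      (j, bad)
    = (j + (pvW aL i (bL.drop j)).1, bad || (pvW aL i (bL.drop j)).2) := by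
  by_cases h : i < aL.length
  · have hdrop : aL.drop i = aL[i] :: aL.drop (i+1) := List.drop_eq_getElem_cons h
    have hget : aL.getD i ' ' = aL[i] := List.getD_eq_getElem aL ' ' h
    have hg2 : aL[i]?.getD ' ' = aL[i] := by simp [List.getElem?_eq_getElem, h]
    rw [hdrop]
    simp only [List.foldl_cons]
    by_cases hj : j < bL.length
    · have hbdrop : bL.drop j = bL[j] :: bL.drop (j+1) := List.drop_eq_getElem_cons hj
      have hbget : bL.getD j ' ' = bL[j] := List.getD_eq_getElem bL ' ' hj
      have hbg2 : bL[j]?.getD ' ' = bL[j] := by simp [List.getElem?_eq_getElem, hj]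
      by_cases hok : pvOk aL[i] bL[j] = true
      · have hcond : (decide (j < bL.length) && pvOk aL[i] (bL.getD j ' ')) = true := by
          simp [hbget, hbg2, hok, hj]
        rw [hbdrop, pvW, dif_pos h]
        simp only [hcond, if_true, hget, hok, if_pos]
        rw [pvB_fold bL aL (i+1) (j+1) bad]
        simp; omega
      · have hok' : pvOk aL[i] bL[j] = false := Bool.eq_false_iff.mpr hok
        have hni : pvOk (aL.getD i ' ') bL[j] = false := by rw [hget]; exact hok'
        have hcond : (decide (j < bL.length) && pvOk aL[i] (bL.getD j ' ')) = false := by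
          simp [hbget, hbg2, hok']
        rw [hbdrop, pvW, dif_pos h]
        simp only [hcond, Bool.false_eq_true, if_false, hni]
        by_cases hup : PySem.Chars.isupper aL[i] = true
        · simp only [hup, if_true]
          rw [pvB_fold bL aL (i+1) j true, hbdrop]
          simp [hget, hg2, hup]
        · have hup' : PySem.Chars.isupper aL[i] = false := Bool.eq_false_iff.mpr hup
          simp only [hup', Bool.false_eq_true, if_false]
          rw [pvB_fold bL aL (i+1) j bad, hbdrop]
          simp [hget, hg2, hup']
    · have hbnil : bL.drop j = [] := List.drop_eq_nil_of_le (by omega)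
      have hcond : (decide (j < bL.length) && pvOk aL[i] (bL.getD j ' ')) = false := by
        simp [hj]
      rw [hbnil, pvW, dif_pos h]
      simp only [hcond, Bool.false_eq_true, if_false]
      by_cases hup : PySem.Chars.isupper aL[i] = true
      · simp only [hup, if_true]
        rw [pvB_fold bL aL (i+1) j true, hbnil]
        simp [hget, hg2, hup]
      · have hup' : PySem.Chars.isupper aL[i] = false := Bool.eq_false_iff.mpr hup
        simp only [hup', Bool.false_eq_true, if_false]
        rw [pvB_fold bL aL (i+1) j bad, hbnil]
        simp [hget, hg2, hup']
  · rw [List.drop_eq_nil_of_le (by omega), pvW.eq_def, dif_neg h]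
    simp
termination_by aL.length - i

lemma pvGetD_set_ne (l : List Nat) (i k a : Nat) (h : i ≠ k) :
    (l.set i a).getD k 0 = l.getD k 0 := by
  simp [List.getD_eq_getElem?_getD, List.getElem?_set, h]

lemma pvGetD_set_self (l : List Nat) (i a : Nat) (h : i < l.length) :
    (l.set i a).getD i 0 = a := by
  simp [List.getD_eq_getElem?_getD, List.getElem?_set, h]

lemma pvA_main (aL : List Char) (bs : List Char) : ∀ (counter : Nat) (check : List Nat),
    check.length = aL.length →
    (∀ k, counter ≤ k → check.getD k 0 = 0) →
    let st := bs.foldl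
      (fun (st : Nat × List Nat) v =>
        match pvFindFrom aL v st.1 with
        | some i => (i + 1, st.2.set i 1)
        | none => st) (counter, check)
    let w := pvW aL counter bs
    st.2.length = aL.length ∧
    counter ≤ st.1 ∧
    (∀ k, k < counter → st.2.getD k 0 = check.getD k 0) ∧
    (∀ k, st.1 ≤ k → st.2.getD k 0 = 0) ∧
    st.2.sum ≤ check.sum + bs.length ∧
    (w.1 = bs.length → st.2.sum = check.sum + bs.length ∧
      ((∃ k, counter ≤ k ∧ k < aL.length ∧ st.2.getD k 0 = 0 ∧ PySem.Chars.isupper (aL.getD k ' ') = true) ↔ w.2 = true)) ∧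
    (w.1 < bs.length → st.2.sum < check.sum + bs.length) := by
  induction bs with
  | nil =>
    intro counter check hlen hinv
    dsimp only [List.foldl_nil]
    refine ⟨hlen, le_refl _, fun k _ => rfl, hinv, by omega, ?_, by simp [pvW_nil]⟩
    intro _
    refine ⟨by simp, ?_⟩
    rw [pvW_nil]
    simp only [List.any_eq_true, List.mem_range'_1]
    constructor
    · rintro ⟨k, hk1, hk2, _, hk4⟩
      exact ⟨k, ⟨hk1, by omega⟩, hk4⟩
    · rintro ⟨k, ⟨hk1, hk2⟩, hk3⟩
      exact ⟨k, hk1, by omega, hinv k hk1, hk3⟩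
  | cons v bs' ih =>
    intro counter check hlen hinv
    dsimp only [List.foldl_cons]
    cases hf : pvFindFrom aL v counter with
    | none =>
      simp only [hf]
      have hno := pvFindFrom_none aL v counter hf
      have hstuck : (pvW aL counter (v :: bs')).1 = 0 := pvW_stuck aL counter v bs' hno
      obtain ⟨i1, i2, i3, i4, i5, _, _⟩ := ih counter check hlen hinv
      refine ⟨i1, i2, i3, i4, by simp only [List.length_cons]; omega, ?_, ?_⟩
      · intro hw1; rw [hstuck] at hw1; simp at hw1
      · intro _; simp only [List.length_cons]; omega
    | some jj =>
      simp only [hf]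
      obtain ⟨hcj, hjlen, hok, hno⟩ := pvFindFrom_some aL v counter jj hf
      have hlen' : (check.set jj 1).length = aL.length := by simp [hlen]
      have hinv' : ∀ k, jj + 1 ≤ k → (check.set jj 1).getD k 0 = 0 := by
        intro k hk
        rw [pvGetD_set_ne check jj k 1 (by omega)]
        exact hinv k (by omega)
      have hsum : (check.set jj 1).sum = check.sum + 1 :=
        pvSum_set check jj (by omega) (hinv jj hcj)
      have hw := pvW_skip aL counter jj v bs' hcj hjlen hok hno
      obtain ⟨i1, i2, i3, i4, i5, i6, i7⟩ := ih (jj+1) (check.set jj 1) hlen' hinv'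
      refine ⟨i1, by omega, ?_, i4, by simp only [List.length_cons]; omega, ?_, ?_⟩
      · intro k hk
        rw [i3 k (by omega), pvGetD_set_ne check jj k 1 (by omega)]
      · intro hw1
        rw [hw] at hw1
        simp only [List.length_cons] at hw1
        have hw1' : (pvW aL (jj+1) bs').1 = bs'.length := by omega
        obtain ⟨e1, e2⟩ := i6 hw1'
        refine ⟨by simp only [List.length_cons]; omega, ?_⟩
        rw [hw]
        simp only [Bool.or_eq_true, List.any_eq_true, List.mem_range'_1]
        constructor
        · rintro ⟨k, hk1, hk2, hk3, hk4⟩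
          rcases lt_trichotomy k jj with hlt | rfl | hgt
          · exact Or.inl ⟨k, ⟨hk1, by omega⟩, hk4⟩
          · rw [i3 k (by omega), pvGetD_set_self check k 1 (by omega)] at hk3
            simp at hk3
          · exact Or.inr (e2.mp ⟨k, by omega, hk2, hk3, hk4⟩)
        · rintro (⟨k, ⟨hk1, hk2⟩, hk3⟩ | h2)
          · refine ⟨k, hk1, by omega, ?_, hk3⟩
            rw [i3 k (by omega), pvGetD_set_ne check jj k 1 (by omega)]
            exact hinv k hk1
          · obtain ⟨k, hk1, hk2, hk3, hk4⟩ := e2.mpr h2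
            exact ⟨k, by omega, hk2, hk3, hk4⟩
      · intro hw1
        rw [hw] at hw1
        simp only [List.length_cons] at hw1
        have : (pvW aL (jj+1) bs').1 < bs'.length := by omega
        have := i7 this
        simp only [List.length_cons]
        omega

lemma pvLogi (aL : List Char) (check : List Nat) (hlen : check.length = aL.length) :
    (((PySem.List.enumerate check).filterMap
        (fun p => if p.2 < 1 then some (PySem.Chars.isupper (aL.getD p.1.toNat ' ')) else none)).countP id = 0)
    ↔ ¬ ∃ k, k < aL.length ∧ check.getD k 0 = 0 ∧ PySem.Chars.isupper (aL.getD k ' ') = true := by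
  rw [List.countP_eq_zero]
  constructor
  · rintro hall ⟨k, hk, h0, hup⟩
    refine hall true ?_ rfl
    rw [List.mem_filterMap]
    refine ⟨((k : Int), check.getD k 0), ?_, ?_⟩
    · rw [PySem.List.mem_enumerate_iff]
      exact ⟨k, by omega, by rw [List.getD_eq_getElem check 0 (by omega)]; simp⟩
    · rw [h0]
      simpa using hup
  · rintro hne x hx hid
    rw [List.mem_filterMap] at hx
    obtain ⟨p, hp, hfp⟩ := hx
    rw [PySem.List.mem_enumerate_iff] at hp
    obtain ⟨k, hk, rfl⟩ := hp
    simp only [Int.zero_add] at hfp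
    by_cases hlt : check[k] < 1
    · rw [if_pos hlt] at hfp
      apply hne
      refine ⟨k, by omega, ?_, ?_⟩
      · rw [List.getD_eq_getElem check 0 (by omega)]; omega
      · have hx : x = PySem.Chars.isupper (aL.getD ((k : Int)).toNat ' ') := (Option.some_inj.mp hfp).symm
        rw [hx] at hid
        simpa using hid
    · rw [if_neg hlt] at hfp
      exact absurd hfp (by simp)

lemma pvPortsEq : ∀ (a : String) (b : String),
    abbreviation3 a b = abbreviation3_alt a b := by
  intro a b
  unfold abbreviation3 abbreviation3_alt
  set aL := a.toList with haL
  set bL := b.toList with hbL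
  have hmain := pvA_main aL bL 0 (List.replicate aL.length 0) (by simp)
    (fun k _ => by simp [List.getD_eq_getElem?_getD, List.getElem?_replicate]; split <;> rfl)
  dsimp only at hmain ⊢
  obtain ⟨m1, m2, m3, m4, m5, m6, m7⟩ := hmain
  have hB := pvB_fold bL aL 0 0 false
  simp only [List.drop_zero] at hB
  rw [hB]
  have hsum0 : (List.replicate aL.length (0:Nat)).sum = 0 := by simp
  rw [hsum0] at m5 m6 m7
  rcases Nat.lt_or_ge (pvW aL 0 bL).1 bL.length with hlt | hge
  · have hs := m7 hlt
    rw [if_neg (by simpa using Nat.ne_of_lt hs)]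
    rw [if_neg (by simp; intro h1; omega)]
  · have heq : (pvW aL 0 bL).1 = bL.length := le_antisymm (pvW_le aL 0 bL) hge
    obtain ⟨e1, e2⟩ := m6 heq
    rw [if_pos (by simpa using e1)]
    by_cases hbad : (pvW aL 0 bL).2 = true
    · rw [if_neg ?hc]
      · rw [if_neg (by simp [heq, hbad])]
      case hc =>
        simp only [beq_iff_eq]
        intro hc
        obtain ⟨k, _, hk2, hk3, hk4⟩ := e2.mpr hbad
        exact (pvLogi aL _ m1).mp hc ⟨k, hk2, hk3, hk4⟩
    · have hbad' : (pvW aL 0 bL).2 = false := Bool.eq_false_iff.mpr hbad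
      rw [if_pos ?hc2]
      · rw [if_pos (by simp [heq, hbad'])]
      case hc2 =>
        simp only [beq_iff_eq]
        refine (pvLogi aL _ m1).mpr ?_
        rintro ⟨k, hk1, hk2, hk3⟩
        have : (pvW aL 0 bL).2 = true := e2.mp ⟨k, by omega, hk1, hk2, hk3⟩
        rw [this] at hbad'
        exact absurd hbad' (by simp)

-- ===== VERDICT (by name: the statement is the Claim_ definition above) =====
theorem abbreviation3_spec : Claim_equal_abbreviation3 := by
  intro a b _
  exact pvPortsEq a b
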